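-- pv_equiv track=rewrite | github.com/k-ngo/boltzomics | drug_screening_input.py | generate_mutant_name_from_text
-- ===== SOURCE A (Python) =====
-- def generate_mutant_name_from_text(mutation_text: str) -> str:
--     """
--     Generate a name for the mutant from the original mutation text.
--
--     Args:
--         mutation_text: Original mutation text like "A102S,G99E"
--
--     Returns:
--         Mutant name string
--     """
--     if not mutation_text.strip():
--         return "WT"
--
--     # Parse the mutation text to extract the format we want for the name
--     mutation_strings = []
--     mutant_strings = [s.strip() for s in mutation_text.split(',')]
--
--     for mutant_str in mutant_strings:
--         if not mutant_str:
--             continue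
--
--         # Split by - to get multiple mutations in one mutant
--         mutation_parts = [s.strip() for s in mutant_str.split('-')]
--
--         for part in mutation_parts:
--             if not part or len(part) < 3:
--                 continue
--
--             # Extract wild-type residue, residue number, and new residue
--             wt_residue = part[0].upper()
--             residue_part = part[1:-1]
--             new_residue = part[-1].upper()
--
--             try:
--                 residue_number = int(residue_part)
--                 if residue_number > 0:
--                     mutation_strings.append(f"{wt_residue}{residue_number}{new_residue}")
--             except ValueError:
--                 continue
--
--     return "-".join(mutation_strings) if mutation_strings else "WT"
-- ===== SOURCE B (Python) =====
-- def _fmt(tok):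
--     """Format one stripped mutation token, or None if it is not a valid mutation."""
--     if len(tok) < 3:
--         return None
--     try:
--         n = int(tok[1:-1])
--     except ValueError:
--         return None
--     if n <= 0:
--         return None
--     return f"{tok[0].upper()}{n}{tok[-1].upper()}"
--
--
-- def generate_mutant_name_from_text(mutation_text: str) -> str:
--     # Single flat character scan: ',' and '-' are both token delimiters,
--     # so the nested comma-then-dash splitting collapses into one pass.
--     tokens = []
--     cur = []
--     for ch in mutation_text + ',':
--         if ch == ',' or ch == '-':
--             tokens.append(''.join(cur).strip())
--             cur = []
--         else:
--             cur.append(ch)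
--     muts = [m for m in map(_fmt, tokens) if m is not None]
--     return '-'.join(muts) if muts else 'WT'
-- ===== Notes on version B (the rewrite author's own statement) =====
-- stated objective: simpler
-- what changed: Replaces the nested comma-split/strip/dash-split loops with one flat character scan that treats comma and dash as equal delimiters, then one filter-map over the stripped tokens; the leading whitespace-only guard disappears because empty tokens are rejected anyway.
import Mathlib
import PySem

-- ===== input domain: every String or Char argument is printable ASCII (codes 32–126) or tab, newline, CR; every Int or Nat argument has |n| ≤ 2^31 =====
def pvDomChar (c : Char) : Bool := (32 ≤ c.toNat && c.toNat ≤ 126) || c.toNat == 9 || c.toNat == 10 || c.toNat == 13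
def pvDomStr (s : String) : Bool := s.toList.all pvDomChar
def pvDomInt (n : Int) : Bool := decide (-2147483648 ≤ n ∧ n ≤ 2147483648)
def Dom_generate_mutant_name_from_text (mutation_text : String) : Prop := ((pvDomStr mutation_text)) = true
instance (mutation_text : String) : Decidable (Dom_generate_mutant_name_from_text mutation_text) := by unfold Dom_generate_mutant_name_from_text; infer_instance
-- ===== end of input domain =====

-- B replaces A's nested comma-then-dash split loops by one flat character scan
-- over the text plus a single filter-map over the stripped tokens (objective: simpler).


-- ===== PORT A =====
def generate_mutant_name_from_text (mutation_text : String) : String :=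
  if PySem.Chars.strip mutation_text.toList = [] then "WT"
  else
    let mutant_strings : List (List Char) :=
      (PySem.Chars.splitOn mutation_text.toList [',']).map PySem.Chars.strip
    let mutation_strings : List (List Char) :=
      mutant_strings.foldl (fun acc mutant_str =>
        if mutant_str = [] then acc
        else
          let mutation_parts : List (List Char) :=
            (PySem.Chars.splitOn mutant_str ['-']).map PySem.Chars.strip
          mutation_parts.foldl (fun acc part =>
            if part = [] ∨ part.length < 3 then acc
            else
              let wt_residue := PySem.Chars.upperChar part.headI
              let residue_part := PySem.List.slice part (some 1) (some (-1))
              let new_residue := PySem.Chars.upperChar part.getLast!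
              match PySem.Int.ofChars? residue_part with
              | none => acc
              | some residue_number =>
                  if residue_number > 0 then
                    acc ++ [[wt_residue] ++ PySem.Int.toChars residue_number ++ [new_residue]]
                  else acc) acc) []
    if mutation_strings = [] then "WT"
    else String.ofList (PySem.Chars.join ['-'] mutation_strings)

-- ===== PORT B =====
-- per-token formatter (Source B's _fmt)
def pvFmtTok (tok : List Char) : Option (List Char) :=
  if tok.length < 3 then none
  else
    match PySem.Int.ofChars? (PySem.List.slice tok (some 1) (some (-1))) with
    | none => none
    | some n =>
        if n ≤ 0 then none
        else some ([PySem.Chars.upperChar tok.headI] ++ PySem.Int.toChars n ++ [PySem.Chars.upperChar tok.getLast!])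

def generate_mutant_name_from_text_alt (mutation_text : String) : String :=
  let st :=
    (mutation_text.toList ++ [',']).foldl
      (fun (st : List (List Char) × List Char) ch =>
        if ch = ',' ∨ ch = '-' then (st.1 ++ [PySem.Chars.strip st.2], [])
        else (st.1, st.2 ++ [ch])) ([], [])
  let muts := st.1.filterMap pvFmtTok
  if muts = [] then "WT" else String.ofList (PySem.Chars.join ['-'] muts)

-- ===== PRECONDITION & SPEC =====
def Spec_generate_mutant_name_from_text (mutation_text : String) (out : String) : Prop := out = generate_mutant_name_from_text_alt mutation_text
instance (mutation_text : String) (out : String) : Decidable (Spec_generate_mutant_name_from_text mutation_text out) := by unfold Spec_generate_mutant_name_from_text; infer_instance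

-- ===== CLAIM (what is proved, stated in full; the proofs are below) =====
def Claim_equal_generate_mutant_name_from_text : Prop := ∀ (mutation_text : String), Dom_generate_mutant_name_from_text mutation_text → Spec_generate_mutant_name_from_text mutation_text (generate_mutant_name_from_text mutation_text)

-- ===== LEMMAS AND PROOFS =====

def splitCh (c : Char) : List Char → List (List Char)
  | [] => [[]]
  | a :: r => if a = c then [] :: splitCh c r else (splitCh c r).modifyHead (a :: ·)

theorem splitCh_ne_nil (c : Char) (l : List Char) : splitCh c l ≠ [] := by
  induction l with
  | nil => simp [splitCh]
  | cons a r ih =>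
      simp only [splitCh]
      split
      · simp
      · cases h : splitCh c r with
        | nil => exact absurd h ih
        | cons t ts => simp

theorem modifyHead_id' {α : Type} (l : List α) : List.modifyHead (fun x => x) l = l := by
  cases l <;> simp

theorem splitOn_go_eq (c : Char) (fuel : Nat) (l cur : List Char) (acc : List (List Char))
    (h : l.length < fuel) :
    PySem.Chars.splitOn.go [c] fuel l cur acc
      = acc.reverse ++ (splitCh c l).modifyHead (cur.reverse ++ ·) := by
  induction fuel generalizing l cur acc with
  | zero => omega
  | succ f ih =>
      cases l with
      | nil =>
          rw [PySem.Chars.splitOn.go]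
          · simp [splitCh]
          · omega
      | cons ch rest =>
          rw [PySem.Chars.splitOn.go]
          by_cases hc : ch = c
          · subst hc
            have hp : [ch].isPrefixOf (ch :: rest) = true := by simp [List.isPrefixOf]
            rw [hp]
            simp only [if_pos, List.length_cons, List.length_nil, Nat.zero_add,
              List.drop_succ_cons, List.drop_zero, if_true]
            rw [ih rest [] (cur.reverse :: acc) (by simp at h; omega)]
            simp [splitCh, modifyHead_id']
          · have hp : [c].isPrefixOf (ch :: rest) = false := by
              simp [List.isPrefixOf]
              exact fun hh => absurd hh.symm hc
            rw [hp]
            simp only [Bool.false_eq_true, if_false]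
            rw [ih rest (ch :: cur) acc (by simp at h; omega)]
            simp only [splitCh, if_neg hc]
            cases hs : splitCh c rest with
            | nil => exact absurd hs (splitCh_ne_nil c rest)
            | cons t ts => simp

theorem splitOn_single (c : Char) (s : List Char) :
    PySem.Chars.splitOn s [c] = splitCh c s := by
  have := splitOn_go_eq c (s.length + 1) s [] [] (by omega)
  simpa [PySem.Chars.splitOn, modifyHead_id'] using this

def splitCD : List Char → List (List Char)
  | [] => [[]]
  | a :: r => if a = ',' ∨ a = '-' then [] :: splitCD r else (splitCD r).modifyHead (a :: ·)

theorem splitCD_ne_nil (l : List Char) : splitCD l ≠ [] := by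
  induction l with
  | nil => simp [splitCD]
  | cons a r ih =>
      simp only [splitCD]
      split
      · simp
      · cases h : splitCD r with
        | nil => exact absurd h ih
        | cons t ts => simp

theorem splitCD_eq_flatMap (cs : List Char) :
    splitCD cs = (splitCh ',' cs).flatMap (splitCh '-') := by
  induction cs with
  | nil => simp [splitCD, splitCh]
  | cons a r ih =>
      by_cases hc : a = ','
      · subst hc
        simp [splitCD, splitCh, ih]
      · by_cases hd : a = '-'
        · subst hd
          simp only [splitCD, splitCh, if_neg hc, true_or, if_true]
          cases hs : splitCh ',' r with
          | nil => exact absurd hs (splitCh_ne_nil _ r)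
          | cons t ts =>
              simp only [List.modifyHead_cons, List.flatMap_cons, splitCh, if_pos rfl]
              rw [ih, hs]
              simp
        · simp only [splitCD, splitCh, if_neg hc, if_neg hd, if_neg (show ¬(a = ',' ∨ a = '-') from fun h => h.elim hc hd)]
          cases hs : splitCh ',' r with
          | nil => exact absurd hs (splitCh_ne_nil _ r)
          | cons t ts =>
              simp only [List.modifyHead_cons, List.flatMap_cons]
              rw [ih, hs]
              simp only [List.flatMap_cons]
              cases ht : splitCh '-' t with
              | nil => exact absurd ht (splitCh_ne_nil _ t)
              | cons u us =>
                  simp [splitCh, if_neg hd, ht]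

theorem strip_cons_ws (a : Char) (t : List Char) (h : PySem.Chars.isspace a = true) :
    PySem.Chars.strip (a :: t) = PySem.Chars.strip t := by
  simp [PySem.Chars.strip, PySem.Chars.lstrip, List.dropWhile_cons, h]

theorem strip_snoc_ws (a : Char) (t : List Char) (h : PySem.Chars.isspace a = true) :
    PySem.Chars.strip (t ++ [a]) = PySem.Chars.strip t := by
  simp only [PySem.Chars.strip, PySem.Chars.lstrip, PySem.Chars.rstrip]
  rw [List.dropWhile_append]
  by_cases he : (List.dropWhile PySem.Chars.isspace t).isEmpty
  · simp [he, List.dropWhile_cons, h, List.isEmpty_iff.mp he]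
  · simp only [he, if_false, Bool.false_eq_true]
    rw [List.reverse_append]
    simp [List.dropWhile_cons, h]

theorem strip_eq_nil_iff (cs : List Char) :
    PySem.Chars.strip cs = [] ↔ ∀ c ∈ cs, PySem.Chars.isspace c = true := by
  constructor
  · intro h c hc
    by_contra hns
    simp only [PySem.Chars.strip, PySem.Chars.rstrip, PySem.Chars.lstrip] at h
    have h2 : List.dropWhile PySem.Chars.isspace (List.dropWhile PySem.Chars.isspace cs).reverse = [] := by
      cases hrev : List.dropWhile PySem.Chars.isspace (List.dropWhile PySem.Chars.isspace cs).reverse with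
      | nil => rfl
      | cons x xs => rw [hrev] at h; simp at h
    -- c survives lstrip? show dropWhile ws cs ≠ []
    have hc2 : c ∈ List.dropWhile PySem.Chars.isspace cs := by
      have hm := hc
      rw [← List.takeWhile_append_dropWhile (p := PySem.Chars.isspace) (l := cs), List.mem_append] at hm
      rcases hm with h1 | h1
      · exact absurd (List.mem_takeWhile_imp h1) (by simp [hns])
      · exact h1
    have : c ∈ (List.dropWhile PySem.Chars.isspace cs).reverse := by simpa using hc2
    rw [← List.takeWhile_append_dropWhile (p := PySem.Chars.isspace)
      (l := (List.dropWhile PySem.Chars.isspace cs).reverse)] at this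
    rw [h2, List.append_nil] at this
    exact absurd (List.mem_takeWhile_imp this) (by simp [hns])
  · intro h
    induction cs with
    | nil => rfl
    | cons a r ih =>
        rw [strip_cons_ws a r (h a (by simp))]
        exact ih (fun c hc => h c (by simp [hc]))

theorem splitCh_snoc (c a : Char) (s : List Char) :
    splitCh c (s ++ [a]) =
      if a = c then splitCh c s ++ [[]]
      else (splitCh c s).dropLast ++ [(splitCh c s).getLast! ++ [a]] := by
  induction s with
  | nil =>
      by_cases h : a = c <;> simp [splitCh, h, List.getLast!]
  | cons b s' ih =>
      by_cases hb : b = c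
      · subst hb
        simp only [List.cons_append, splitCh, if_pos rfl, ih]
        by_cases h : a = b
        · simp [h]
        · simp only [if_neg h]
          cases hs : splitCh b s' with
          | nil => exact absurd hs (splitCh_ne_nil _ _)
          | cons t ts =>
              simp [List.getLast!]
      · simp only [List.cons_append, splitCh, if_neg hb, ih]
        by_cases h : a = c
        · simp only [if_pos h]
          cases hs : splitCh c s' with
          | nil => exact absurd hs (splitCh_ne_nil _ _)
          | cons t ts => simp
        · simp only [if_neg h]
          cases hs : splitCh c s' with
          | nil => exact absurd hs (splitCh_ne_nil _ _)
          | cons t ts =>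
              cases ts with
              | nil => simp [List.getLast!]
              | cons u us => simp [List.getLast!, List.dropLast_cons_of_ne_nil]

theorem map_strip_modifyHead_ws (a : Char) (S : List (List Char)) (h : PySem.Chars.isspace a = true) :
    (S.modifyHead (a :: ·)).map PySem.Chars.strip = S.map PySem.Chars.strip := by
  cases S with
  | nil => rfl
  | cons t ts => simp [strip_cons_ws a t h]

theorem map_strip_splitCh_lstrip (c : Char) (p : List Char) (hc : PySem.Chars.isspace c = false) :
    (splitCh c (PySem.Chars.lstrip p)).map PySem.Chars.strip
      = (splitCh c p).map PySem.Chars.strip := by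
  induction p with
  | nil => rfl
  | cons a r ih =>
      by_cases hw : PySem.Chars.isspace a = true
      · have hac : ¬ a = c := fun h => by rw [h, hc] at hw; exact Bool.false_ne_true hw
        have h1 : PySem.Chars.lstrip (a :: r) = PySem.Chars.lstrip r := by
          simp [PySem.Chars.lstrip, List.dropWhile_cons, hw]
        rw [h1, ih]
        simp only [splitCh, if_neg hac]
        rw [map_strip_modifyHead_ws a _ hw]
      · have h1 : PySem.Chars.lstrip (a :: r) = a :: r := by
          simp [PySem.Chars.lstrip, List.dropWhile_cons, Bool.of_not_eq_true hw]
        rw [h1]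

theorem map_strip_splitCh_rstrip (c : Char) (p : List Char) (hc : PySem.Chars.isspace c = false) :
    (splitCh c (PySem.Chars.rstrip p)).map PySem.Chars.strip
      = (splitCh c p).map PySem.Chars.strip := by
  induction p using List.reverseRecOn with
  | nil => rfl
  | append_singleton s a ih =>
      by_cases hw : PySem.Chars.isspace a = true
      · have hac : ¬ a = c := fun h => by rw [h, hc] at hw; exact Bool.false_ne_true hw
        have h1 : PySem.Chars.rstrip (s ++ [a]) = PySem.Chars.rstrip s := by
          simp [PySem.Chars.rstrip, List.dropWhile_cons, hw]
        rw [h1, ih, splitCh_snoc, if_neg hac]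
        have hS := splitCh_ne_nil c s
        have h2 : (splitCh c s).map PySem.Chars.strip
            = ((splitCh c s).dropLast).map PySem.Chars.strip
              ++ [PySem.Chars.strip ((splitCh c s).getLast hS)] := by
          conv_lhs => rw [← List.dropLast_append_getLast hS]
          simp
        rw [List.map_append, h2]
        congr 1
        simp [strip_snoc_ws a _ hw, List.getLast?_eq_some_getLast hS]
      · have h1 : PySem.Chars.rstrip (s ++ [a]) = s ++ [a] := by
          simp [PySem.Chars.rstrip, List.dropWhile_cons, Bool.of_not_eq_true hw]
        rw [h1]

theorem map_strip_splitCh_strip (c : Char) (p : List Char) (hc : PySem.Chars.isspace c = false) :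
    (splitCh c (PySem.Chars.strip p)).map PySem.Chars.strip
      = (splitCh c p).map PySem.Chars.strip := by
  rw [PySem.Chars.strip, map_strip_splitCh_rstrip c _ hc, map_strip_splitCh_lstrip c _ hc]

theorem scan_tokens (cs : List Char) (toks : List (List Char)) (cur : List Char) :
    ((cs ++ [',']).foldl
      (fun (st : List (List Char) × List Char) ch =>
        if ch = ',' ∨ ch = '-' then (st.1 ++ [PySem.Chars.strip st.2], [])
        else (st.1, st.2 ++ [ch])) (toks, cur)).1
      = toks ++ ((splitCD cs).modifyHead (cur ++ ·)).map PySem.Chars.strip := by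
  induction cs generalizing toks cur with
  | nil => simp [splitCD]
  | cons a r ih =>
      by_cases hd : a = ',' ∨ a = '-'
      · simp only [List.cons_append, List.foldl_cons, if_pos hd]
        rw [ih]
        simp only [splitCD, if_pos hd, List.modifyHead_cons, List.map_cons]
        cases hs : splitCD r with
        | nil => exact absurd hs (splitCD_ne_nil r)
        | cons t ts => simp
      · simp only [List.cons_append, List.foldl_cons, if_neg hd]
        rw [ih]
        simp only [splitCD, if_neg hd]
        cases hs : splitCD r with
        | nil => exact absurd hs (splitCD_ne_nil r)
        | cons t ts => simp

theorem mem_splitCD (cs : List Char) (p : List Char) (hp : p ∈ splitCD cs) (x : Char) (hx : x ∈ p) :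
    x ∈ cs := by
  induction cs generalizing p with
  | nil =>
      simp [splitCD] at hp
      subst hp
      exact absurd hx (List.not_mem_nil)
  | cons a r ih =>
      simp only [splitCD] at hp
      split at hp
      · rcases List.mem_cons.mp hp with h | h
        · subst h; exact absurd hx (List.not_mem_nil)
        · exact List.mem_cons_of_mem a (ih _ h hx)
      · cases hs : splitCD r with
        | nil => exact absurd hs (splitCD_ne_nil r)
        | cons t ts =>
            rw [hs] at hp
            simp only [List.modifyHead_cons] at hp
            rcases List.mem_cons.mp hp with h | h
            · subst h
              rcases List.mem_cons.mp hx with h | h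
              · simp [h]
              · exact List.mem_cons_of_mem a (ih t (by simp [hs]) h)
            · exact List.mem_cons_of_mem a (ih p (by simp [hs, h]) hx)


theorem toList_foldl_filterMap {α β : Type} (f : α → Option β) (l : List α) (acc : List β) :
    l.foldl (fun acc x => acc ++ (f x).toList) acc = acc ++ l.filterMap f := by
  induction l generalizing acc with
  | nil => simp
  | cons a r ih =>
      cases h : f a <;> simp [ih, h]

theorem inner_body_eq (acc : List (List Char)) (part : List Char) :
    (if part = [] ∨ part.length < 3 then acc
     else
       let wt_residue := PySem.Chars.upperChar part.headI
       let residue_part := PySem.List.slice part (some 1) (some (-1))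
       let new_residue := PySem.Chars.upperChar part.getLast!
       match PySem.Int.ofChars? residue_part with
       | none => acc
       | some residue_number =>
           if residue_number > 0 then
             acc ++ [[wt_residue] ++ PySem.Int.toChars residue_number ++ [new_residue]]
           else acc)
      = acc ++ (pvFmtTok part).toList := by
  have hlen : (part = [] ∨ part.length < 3) ↔ part.length < 3 := by
    constructor
    · rintro (h | h)
      · simp [h]
      · exact h
    · exact Or.inr
  by_cases h3 : part.length < 3
  · simp [pvFmtTok, if_pos (hlen.mpr h3), h3]
  · rw [if_neg (fun hh => h3 (hlen.mp hh))]
    simp only [pvFmtTok, if_neg h3]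
    cases hi : PySem.Int.ofChars? (PySem.List.slice part (some 1) (some (-1))) with
    | none => simp
    | some n =>
        by_cases hn : n > 0
        · simp [hn, show ¬ n ≤ 0 by omega]
        · simp [hn, show n ≤ 0 by omega]



theorem a_fold_eq (cs : List Char) :
    ((PySem.Chars.splitOn cs [',']).map PySem.Chars.strip).foldl (fun acc mutant_str =>
        if mutant_str = [] then acc
        else
          ((PySem.Chars.splitOn mutant_str ['-']).map PySem.Chars.strip).foldl (fun acc part =>
            if part = [] ∨ part.length < 3 then acc
            else
              let wt_residue := PySem.Chars.upperChar part.headI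
              let residue_part := PySem.List.slice part (some 1) (some (-1))
              let new_residue := PySem.Chars.upperChar part.getLast!
              match PySem.Int.ofChars? residue_part with
              | none => acc
              | some residue_number =>
                  if residue_number > 0 then
                    acc ++ [[wt_residue] ++ PySem.Int.toChars residue_number ++ [new_residue]]
                  else acc) acc) []
      = ((splitCD cs).map PySem.Chars.strip).filterMap pvFmtTok := by
  have hbody : ∀ (acc : List (List Char)) (ms : List Char),
      (if ms = [] then acc
       else
         ((PySem.Chars.splitOn ms ['-']).map PySem.Chars.strip).foldl (fun acc part =>
            if part = [] ∨ part.length < 3 then acc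
            else
              let wt_residue := PySem.Chars.upperChar part.headI
              let residue_part := PySem.List.slice part (some 1) (some (-1))
              let new_residue := PySem.Chars.upperChar part.getLast!
              match PySem.Int.ofChars? residue_part with
              | none => acc
              | some residue_number =>
                  if residue_number > 0 then
                    acc ++ [[wt_residue] ++ PySem.Int.toChars residue_number ++ [new_residue]]
                  else acc) acc)
        = acc ++ ((splitCh '-' ms).map PySem.Chars.strip).filterMap pvFmtTok := by
    intro acc ms
    by_cases hms : ms = []
    · subst hms
      simp [splitCh, PySem.Chars.strip, PySem.Chars.lstrip, PySem.Chars.rstrip, pvFmtTok]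
    · rw [if_neg hms, splitOn_single]
      have : (fun (acc : List (List Char)) (part : List Char) =>
          if part = [] ∨ part.length < 3 then acc
          else
            let wt_residue := PySem.Chars.upperChar part.headI
            let residue_part := PySem.List.slice part (some 1) (some (-1))
            let new_residue := PySem.Chars.upperChar part.getLast!
            match PySem.Int.ofChars? residue_part with
            | none => acc
            | some residue_number =>
                if residue_number > 0 then
                  acc ++ [[wt_residue] ++ PySem.Int.toChars residue_number ++ [new_residue]]
                else acc)
          = (fun acc part => acc ++ (pvFmtTok part).toList) := by
        funext acc part
        exact inner_body_eq acc part
      rw [this, toList_foldl_filterMap]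
  have hfun : (fun (acc : List (List Char)) (mutant_str : List Char) =>
      if mutant_str = [] then acc
      else
        ((PySem.Chars.splitOn mutant_str ['-']).map PySem.Chars.strip).foldl (fun acc part =>
          if part = [] ∨ part.length < 3 then acc
          else
            let wt_residue := PySem.Chars.upperChar part.headI
            let residue_part := PySem.List.slice part (some 1) (some (-1))
            let new_residue := PySem.Chars.upperChar part.getLast!
            match PySem.Int.ofChars? residue_part with
            | none => acc
            | some residue_number =>
                if residue_number > 0 then
                  acc ++ [[wt_residue] ++ PySem.Int.toChars residue_number ++ [new_residue]]
                else acc) acc)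
      = (fun acc ms => acc ++ ((splitCh '-' ms).map PySem.Chars.strip).filterMap pvFmtTok) := by
    funext acc ms
    exact hbody acc ms
  rw [hfun, PySem.List.foldl_append_eq_flatMap, List.nil_append, splitOn_single]
  have hdash : PySem.Chars.isspace '-' = false := by decide
  calc ((splitCh ',' cs).map PySem.Chars.strip).flatMap
          (fun ms => ((splitCh '-' ms).map PySem.Chars.strip).filterMap pvFmtTok)
      = (splitCh ',' cs).flatMap
          (fun p => ((splitCh '-' p).map PySem.Chars.strip).filterMap pvFmtTok) := by
        rw [List.flatMap_map]
        congr 1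
        funext p
        exact congrArg (List.filterMap pvFmtTok) (map_strip_splitCh_strip '-' p hdash)
    _ = ((splitCh ',' cs).flatMap (fun p => (splitCh '-' p).map PySem.Chars.strip)).filterMap pvFmtTok := by
        rw [List.filterMap_flatMap]
    _ = (((splitCh ',' cs).flatMap (splitCh '-')).map PySem.Chars.strip).filterMap pvFmtTok := by
        rw [List.map_flatMap]
    _ = ((splitCD cs).map PySem.Chars.strip).filterMap pvFmtTok := by
        rw [← splitCD_eq_flatMap]

theorem main_eq (s : String) :
    generate_mutant_name_from_text s = generate_mutant_name_from_text_alt s := by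
  have hB : generate_mutant_name_from_text_alt s
      = (if ((splitCD s.toList).map PySem.Chars.strip).filterMap pvFmtTok = [] then "WT"
         else String.ofList (PySem.Chars.join ['-']
                (((splitCD s.toList).map PySem.Chars.strip).filterMap pvFmtTok))) := by
    simp only [generate_mutant_name_from_text_alt]
    rw [scan_tokens s.toList [] []]
    simp [modifyHead_id']
  rw [hB]
  simp only [generate_mutant_name_from_text]
  by_cases hw : PySem.Chars.strip s.toList = []
  · rw [if_pos hw]
    have hall := (strip_eq_nil_iff s.toList).mp hw
    have hnil : ((splitCD s.toList).map PySem.Chars.strip).filterMap pvFmtTok = [] := by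
      rw [List.filterMap_eq_nil_iff]
      intro x hx
      rcases List.mem_map.mp hx with ⟨p, hp, rfl⟩
      have : PySem.Chars.strip p = [] := by
        rw [strip_eq_nil_iff]
        intro c hc
        exact hall c (mem_splitCD s.toList p hp c hc)
      rw [this]
      rfl
    rw [if_pos hnil]
  · rw [if_neg hw]
    rw [a_fold_eq s.toList]

-- ===== VERDICT (by name: the statement is the Claim_ definition above) =====
theorem generate_mutant_name_from_text_spec : Claim_equal_generate_mutant_name_from_text := by
  intro mutation_text _
  unfold Spec_generate_mutant_name_from_text
  exact main_eq mutation_text
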